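-- pv_equiv track=rewrite | github.com/bararia-swati/cs6111 | query_ordering.py | cal_frequency
-- ===== SOURCE A (Python) =====
-- def cal_frequency(k,clean_bin_corpus):
--     permutation_to_frequency = dict()
--     max_frequency = 0
--     new_bin_query = ""
--     for n in range(2,k+1):
--         for i in range(len(clean_bin_corpus)-n+1):
--             check_unique = set()
--             for j in range(n):
--                 check_unique.add(clean_bin_corpus[i+j])
--             if(len(check_unique)==n):
--                 if(clean_bin_corpus[i:i+n] in permutation_to_frequency.keys()):
--                     permutation_to_frequency[clean_bin_corpus[i:i+n]]+=1
--                 else: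
--                     permutation_to_frequency[clean_bin_corpus[i:i+n]]=1
--                 if(max_frequency<permutation_to_frequency[clean_bin_corpus[i:i+n]]):
--                     max_frequency = max(max_frequency,permutation_to_frequency[clean_bin_corpus[i:i+n]])
--                     new_bin_query = clean_bin_corpus[i:i+n]
--     return permutation_to_frequency,max_frequency,new_bin_query
-- ===== SOURCE B (Python) =====
-- def cal_frequency(k, clean_bin_corpus):
--     # precompute run[i] = length of longest all-distinct-chars window starting at i,
--     # then count windows with an O(1) test per window, capping n at min(k, len).
--     s = clean_bin_corpus
--     cs = list(s)
--     L = len(cs)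
--     rev = [0]
--     for i in range(L - 1, -1, -1):
--         m = rev[-1]
--         win = cs[i + 1:i + 1 + m]
--         if cs[i] in win:
--             rev.append(win.index(cs[i]) + 1)
--         else:
--             rev.append(m + 1)
--     run = rev[::-1]
--     freq = {}
--     max_frequency = 0
--     new_bin_query = ""
--     top = min(k, L)
--     for n in range(2, top + 1):
--         for i in range(L - n + 1):
--             if run[i] >= n:
--                 w = s[i:i + n]
--                 c = freq.get(w, 0) + 1
--                 freq[w] = c
--                 if c > max_frequency:
--                     max_frequency = c
--                     new_bin_query = w
--     return freq, max_frequency, new_bin_query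
-- ===== Notes on version B (the rewrite author's own statement) =====
-- stated objective: faster
-- what changed: A rebuilds a character set for every candidate window (and iterates n up to k even past the string length); B precomputes, in one backward pass, run[i] = the length of the longest all-distinct-character window starting at i, so each window's uniqueness test is a single table lookup, and caps the window-length loop at min(k, len(corpus)).
import Mathlib
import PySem

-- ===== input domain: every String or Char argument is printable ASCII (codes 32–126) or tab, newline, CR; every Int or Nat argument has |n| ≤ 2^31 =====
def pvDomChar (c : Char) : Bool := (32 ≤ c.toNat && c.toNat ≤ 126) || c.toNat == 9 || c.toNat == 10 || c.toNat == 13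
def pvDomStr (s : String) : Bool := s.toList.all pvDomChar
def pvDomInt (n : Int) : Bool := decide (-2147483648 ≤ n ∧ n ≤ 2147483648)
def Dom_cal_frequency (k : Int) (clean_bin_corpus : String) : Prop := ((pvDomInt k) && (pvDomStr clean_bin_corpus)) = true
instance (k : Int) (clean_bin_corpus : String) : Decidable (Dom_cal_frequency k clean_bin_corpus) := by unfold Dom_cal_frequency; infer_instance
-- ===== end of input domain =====

-- B replaces A's per-window set-building uniqueness test (and its k-long outer loop) by a precomputed
-- longest-distinct-run table and a loop capped at min(k, len): objective 'faster'.


-- ===== PORT A =====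
-- (PySem.Str.pyGet? …).getD ' ' : the index i+j is always in range inside these loops, so Python never raises here.
def cal_frequency (k : Int) (clean_bin_corpus : String) : (List (String × Int)) × Int × String :=
  let res := (PySem.List.pyRange 2 (k+1) 1).foldl (fun st n =>
    (PySem.List.pyRange 0 (PySem.Str.len clean_bin_corpus - n + 1) 1).foldl (fun st i =>
      let check_unique := (PySem.List.pyRange 0 n 1).foldl
        (fun cu j => PySem.Set.add cu ((PySem.Str.pyGet? clean_bin_corpus (i+j)).getD ' '))
        PySem.Set.empty
      if PySem.Set.len check_unique = n then
        let d := st.1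
        let key := PySem.Str.slice clean_bin_corpus (some i) (some (i+n))
        let d' := if PySem.Dict.contains d key
                  then PySem.Dict.insert d key (PySem.Dict.getD d key 0 + 1)
                  else PySem.Dict.insert d key 1
        let v := PySem.Dict.getD d' key 0
        if st.2.1 < v then (d', max st.2.1 v, key) else (d', st.2.1, st.2.2)
      else st) st) (PySem.Dict.empty, 0, "")
  (res.1.items, res.2.1, res.2.2)

-- ===== PORT B =====
-- (first computes run[i] = longest all-distinct window starting at i, then tests each window in O(1);
--  pyGetD defaults are never hit: every index below is in range on every input.)
def cal_frequency_alt (k : Int) (clean_bin_corpus : String) : (List (String × Int)) × Int × String :=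
  let cs := clean_bin_corpus.toList
  let L : Int := (cs.length : Int)
  let rev := (PySem.List.pyRange (L-1) (-1) (-1)).foldl (fun rev i =>
      let m := PySem.List.pyGetD rev (-1) 0
      let win := PySem.List.slice cs (some (i+1)) (some (i+1+m))
      let c := PySem.List.pyGetD cs i ' '
      if c ∈ win then rev ++ [(((PySem.List.index? win c).getD 0 : Nat) : Int) + 1]
      else rev ++ [m + 1]) [(0 : Int)]
  let run := (PySem.List.slice? rev none none (-1)).getD []
  let top := min k L
  let res := (PySem.List.pyRange 2 (top+1) 1).foldl (fun st n =>
    (PySem.List.pyRange 0 (L - n + 1) 1).foldl (fun st i =>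
      if PySem.List.pyGetD run i 0 ≥ n then
        let w := PySem.Str.slice clean_bin_corpus (some i) (some (i+n))
        let c := PySem.Dict.getD st.1 w 0 + 1
        let freq := PySem.Dict.insert st.1 w c
        if c > st.2.1 then (freq, c, w) else (freq, st.2.1, st.2.2)
      else st) st) (PySem.Dict.empty, 0, "")
  (res.1.items, res.2.1, res.2.2)

-- ===== PRECONDITION & SPEC =====
def Spec_cal_frequency (k : Int) (clean_bin_corpus : String) (out : (List (String × Int)) × Int × String) : Prop := out = cal_frequency_alt k clean_bin_corpus
instance (k : Int) (clean_bin_corpus : String) (out : (List (String × Int)) × Int × String) : Decidable (Spec_cal_frequency k clean_bin_corpus out) := by unfold Spec_cal_frequency; infer_instance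

-- ===== CLAIM (what is proved, stated in full; the proofs are below) =====
def Claim_equal_cal_frequency : Prop := ∀ (k : Int) (clean_bin_corpus : String), Dom_cal_frequency k clean_bin_corpus → Spec_cal_frequency k clean_bin_corpus (cal_frequency k clean_bin_corpus)

-- ===== LEMMAS AND PROOFS =====


-- longest all-distinct-character prefix length (the quantity B's run table stores)
def mrun : List Char → Nat
  | [] => 0
  | c :: t =>
      let m := mrun t
      let w := t.take m
      if c ∈ w then w.idxOf c + 1 else m + 1

theorem mem_take_iff (l : List Char) (c : Char) (n : Nat) :
    c ∈ l.take n ↔ c ∈ l ∧ l.idxOf c < n := by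
  induction l generalizing n with
  | nil => simp
  | cons a t ih =>
    cases n with
    | zero => simp
    | succ n =>
      by_cases h : c = a
      · subst h; simp
      · simp [Ne.symm h, h, ih]

theorem mrun_le (l : List Char) : mrun l ≤ l.length := by
  induction l with
  | nil => simp [mrun]
  | cons c t ih =>
    simp only [mrun, List.length_cons]
    split
    · rename_i h
      have h2 := (mem_take_iff t c (mrun t)).mp h
      have h3 : (t.take (mrun t)).idxOf c = t.idxOf c :=
        (t.take_prefix (mrun t)).idxOf_eq_of_mem h
      have h4 : t.idxOf c < t.length := List.idxOf_lt_length_iff.mpr h2.1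
      omega
    · omega

theorem key_mrun (l : List Char) (n : Nat) :
    n ≤ mrun l ↔ n ≤ l.length ∧ (l.take n).Nodup := by
  induction l generalizing n with
  | nil => simp [mrun]
  | cons c t ih =>
    cases n with
    | zero => simp
    | succ n =>
      have hml := mrun_le t
      simp only [mrun, List.take_succ_cons, List.nodup_cons, List.length_cons,
        Nat.succ_le_succ_iff]
      by_cases hc : c ∈ t.take (mrun t)
      · have hct : c ∈ t := ((mem_take_iff t c (mrun t)).mp hc).1
        have hwm : t.idxOf c < mrun t := ((mem_take_iff t c (mrun t)).mp hc).2
        have hidx : (t.take (mrun t)).idxOf c = t.idxOf c :=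
          (t.take_prefix (mrun t)).idxOf_eq_of_mem hc
        have hil : t.idxOf c < t.length := List.idxOf_lt_length_iff.mpr hct
        simp only [hc, if_pos, hidx]
        constructor
        · intro h
          have h2 : n ≤ mrun t := by omega
          refine ⟨by omega, ?_, ((ih n).mp h2).2⟩
          intro hmem
          have := ((mem_take_iff t c n).mp hmem).2
          omega
        · rintro ⟨hn, hnotin, hnd⟩
          by_contra hlt
          exact hnotin ((mem_take_iff t c n).mpr ⟨hct, by omega⟩)
      · simp only [hc, if_neg, not_false_iff]
        constructor
        · intro h
          have h1 : n ≤ mrun t := by omega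
          refine ⟨((ih n).mp h1).1, ?_, ((ih n).mp h1).2⟩
          intro hmem
          have htt : t.take n = (t.take (mrun t)).take n := by
            rw [List.take_take]; congr 1; omega
          rw [htt] at hmem
          exact hc (List.take_subset n _ hmem)
        · rintro ⟨hn, hnotin, hnd⟩
          have := (ih n).mpr ⟨hn, hnd⟩
          omega

theorem setlen_iff (w : List Char) :
    (PySem.Set.ofList w).length = w.length ↔ w.Nodup := by
  have h1 : (PySem.Set.ofList w).toFinset = w.toFinset := by
    apply Finset.ext
    intro x
    simp [List.mem_toFinset, PySem.Set.mem_ofList]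
  have h2 : (PySem.Set.ofList w).toFinset.card = (PySem.Set.ofList w).length :=
    List.toFinset_card_of_nodup (PySem.Set.nodup_ofList w)
  have h3 : w.toFinset.card = w.dedup.length := List.card_toFinset w
  have h4 : (PySem.Set.ofList w).length = w.dedup.length := by rw [← h2, h1, h3]
  rw [h4]
  constructor
  · intro h
    exact List.dedup_eq_self.mp ((List.dedup_sublist w).eq_of_length h)
  · intro h
    rw [List.dedup_eq_self.mpr h]

theorem foldl_id {α β : Type} {l : List α} {f : β → α → β}
    (h : ∀ x ∈ l, ∀ st, f st x = st) (st : β) : l.foldl f st = st := by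
  induction l generalizing st with
  | nil => rfl
  | cons a t ih =>
    rw [List.foldl_cons, h a (by simp)]
    exact ih (fun x hx st => h x (by simp [hx]) st) st

theorem idxOf?_getD_of_mem {l : List Char} {c : Char} (h : c ∈ l) :
    (l.idxOf? c).getD 0 = l.idxOf c := by
  cases heq : l.idxOf? c with
  | none => exact absurd (List.idxOf?_eq_none_iff.mp heq) (by simpa using h)
  | some i =>
    have := List.idxOf_eq_getD_idxOf? (a := c) (l := l)
    rw [heq] at this
    simp [this]
theorem rev_fold (cs : List Char) (a : Nat) (ha : a ≤ cs.length) :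
    (PySem.List.pyRange ((a : Int) - 1) (-1) (-1)).foldl
      (fun rev i =>
        let m := PySem.List.pyGetD rev (-1) 0
        let win := PySem.List.slice cs (some (i+1)) (some (i+1+m))
        let c := PySem.List.pyGetD cs i ' '
        if c ∈ win then rev ++ [(((PySem.List.index? win c).getD 0 : Nat) : Int) + 1]
        else rev ++ [m + 1])
      (((List.range' a (cs.length + 1 - a)).map (fun j => ((mrun (cs.drop j) : Nat) : Int))).reverse)
    = ((List.range' 0 (cs.length + 1)).map (fun j => ((mrun (cs.drop j) : Nat) : Int))).reverse := by
  induction a with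
  | zero =>
    rw [PySem.List.pyRange_neg_one_eq_nil (by omega)]
    rfl
  | succ a ih =>
    have haL : a < cs.length := by omega
    have hcons : PySem.List.pyRange (((a+1 : Nat) : Int) - 1) (-1) (-1)
        = (a : Int) :: PySem.List.pyRange ((a : Int) - 1) (-1) (-1) := by
      have h1 : (((a+1 : Nat) : Int) - 1) = (a : Int) := by push_cast; ring
      rw [h1, PySem.List.pyRange_neg_one_cons (by omega)]
    have hstep :
        (fun rev i =>
          let m := PySem.List.pyGetD rev (-1) 0
          let win := PySem.List.slice cs (some (i+1)) (some (i+1+m))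
          let c := PySem.List.pyGetD cs i ' '
          if c ∈ win then rev ++ [(((PySem.List.index? win c).getD 0 : Nat) : Int) + 1]
          else rev ++ [m + 1])
          (((List.range' (a+1) (cs.length + 1 - (a+1))).map (fun j => ((mrun (cs.drop j) : Nat) : Int))).reverse)
          (a : Int)
        = ((List.range' a (cs.length + 1 - a)).map (fun j => ((mrun (cs.drop j) : Nat) : Int))).reverse := by
      have hsplit : List.range' (a+1) (cs.length + 1 - (a+1))
          = (a+1) :: List.range' (a+2) (cs.length - (a+1)) := by
        have h2 : cs.length + 1 - (a+1) = (cs.length - (a+1)) + 1 := by omega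
        rw [h2, List.range'_succ]
      have hrev : ((List.range' (a+1) (cs.length + 1 - (a+1))).map
            (fun j => ((mrun (cs.drop j) : Nat) : Int))).reverse
          = ((List.range' (a+2) (cs.length - (a+1))).map
              (fun j => ((mrun (cs.drop j) : Nat) : Int))).reverse
            ++ [((mrun (cs.drop (a+1)) : Nat) : Int)] := by
        rw [hsplit, List.map_cons, List.reverse_cons]
      rw [hrev]
      simp only [PySem.List.pyGetD_neg_one_append_singleton]
      -- the window
      have hwin : PySem.List.slice cs (some ((a : Int) + 1))
            (some ((a : Int) + 1 + ((mrun (cs.drop (a+1)) : Nat) : Int)))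
          = (cs.drop (a+1)).take (mrun (cs.drop (a+1))) := by
        have h3 : ((a : Int) + 1) = (((a+1 : Nat)) : Int) := by push_cast; ring
        rw [h3, PySem.List.slice_natCast_add]
      have hc : PySem.List.pyGetD cs (a : Int) ' ' = cs[a] := by
        rw [PySem.List.pyGetD_eq_getElem cs ' ' (by omega) (by exact_mod_cast haL)]
        simp
      have hdrop : cs.drop a = cs[a] :: cs.drop (a+1) := (List.getElem_cons_drop haL).symm
      have hmr : mrun (cs.drop a)
          = if cs[a] ∈ (cs.drop (a+1)).take (mrun (cs.drop (a+1)))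
            then ((cs.drop (a+1)).take (mrun (cs.drop (a+1)))).idxOf cs[a] + 1
            else mrun (cs.drop (a+1)) + 1 := by
        rw [hdrop]; rfl
      simp only [hwin, hc]
      by_cases hmem : cs[a] ∈ (cs.drop (a+1)).take (mrun (cs.drop (a+1)))
      · rw [if_pos hmem]
        have hidx : PySem.List.index? ((cs.drop (a+1)).take (mrun (cs.drop (a+1)))) cs[a]
            = ((cs.drop (a+1)).take (mrun (cs.drop (a+1)))).idxOf? cs[a] := rfl
        have hfin : List.range' a (cs.length + 1 - a)
            = a :: List.range' (a+1) (cs.length + 1 - (a+1)) := by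
          have h5 : cs.length + 1 - a = (cs.length + 1 - (a+1)) + 1 := by omega
          rw [h5, List.range'_succ]
        rw [hfin, List.map_cons, List.reverse_cons, hrev]
        congr 1
        rw [hmr, if_pos hmem, hidx, idxOf?_getD_of_mem hmem]
        push_cast
        rfl
      · rw [if_neg hmem]
        have hfin : List.range' a (cs.length + 1 - a)
            = a :: List.range' (a+1) (cs.length + 1 - (a+1)) := by
          have h5 : cs.length + 1 - a = (cs.length + 1 - (a+1)) + 1 := by omega
          rw [h5, List.range'_succ]
        rw [hfin, List.map_cons, List.reverse_cons, hrev]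
        congr 1
        rw [hmr, if_neg hmem]
        push_cast
        rfl
    rw [hcons]
    rw [List.foldl_cons, ← ih (by omega)]
    exact congrArg (fun z => List.foldl _ z (PySem.List.pyRange ((a : Int) - 1) (-1) (-1))) hstep
theorem window_map (cs : List Char) (i n : Nat) (h : i + n ≤ cs.length) :
    (List.range n).map (fun j => (cs[(i+j)]?).getD ' ') = (cs.drop i).take n := by
  apply List.ext_getElem
  · simp; omega
  · intro j h1 h2
    simp only [List.getElem_map, List.getElem_range, List.getElem_take, List.getElem_drop]
    have hj : j < n := by simpa using h1
    rw [List.getElem?_eq_getElem (by omega)]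
    rfl

theorem testA_iff (s : String) (n i : Int) (hn : 0 ≤ n) (hi : 0 ≤ i)
    (hin : i + n ≤ (s.toList.length : Int)) :
    (PySem.Set.len ((PySem.List.pyRange 0 n 1).foldl
        (fun cu j => PySem.Set.add cu ((PySem.Str.pyGet? s (i+j)).getD ' '))
        PySem.Set.empty) = n)
    ↔ ((s.toList.drop i.toNat).take n.toNat).Nodup := by
  have hfold : (PySem.List.pyRange 0 n 1).foldl
        (fun cu j => PySem.Set.add cu ((PySem.Str.pyGet? s (i+j)).getD ' '))
        PySem.Set.empty
      = PySem.Set.ofList ((s.toList.drop i.toNat).take n.toNat) := by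
    rw [PySem.List.pyRange_one, List.foldl_map,
      PySem.Set.ofList_eq_foldl, ← window_map s.toList i.toNat n.toNat (by omega),
      List.foldl_map]
    simp only [sub_zero]
    apply PySem.List.foldl_congr_mem
    intro acc j _
    congr 1
    have hij : i + ((0 : Int) + (j : Int)) = ((i.toNat + j : Nat) : Int) := by omega
    rw [hij, PySem.Str.pyGet?_natCast]
  rw [hfold]
  have hlen : ((s.toList.drop i.toNat).take n.toNat).length = n.toNat := by
    simp only [List.length_take, List.length_drop]; omega
  unfold PySem.Set.len
  constructor
  · intro h
    apply (setlen_iff _).mp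
    rw [hlen]; omega
  · intro h
    rw [(setlen_iff _).mpr h, hlen]; omega

theorem testB_iff (cs : List Char) (n i : Int) (hn : 0 ≤ n) (hi : 0 ≤ i)
    (hin : i + n ≤ (cs.length : Int)) :
    (PySem.List.pyGetD ((List.range (cs.length + 1)).map
        (fun j => ((mrun (cs.drop j) : Nat) : Int))) i 0 ≥ n)
    ↔ ((cs.drop i.toNat).take n.toNat).Nodup := by
  have hl : (i : Int) < (((List.range (cs.length + 1)).map
      (fun j => ((mrun (cs.drop j) : Nat) : Int))).length : Int) := by
    simp; omega
  rw [PySem.List.pyGetD_eq_getElem _ 0 hi hl]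
  simp only [List.getElem_map, List.getElem_range]
  rw [ge_iff_le]
  constructor
  · intro h
    have h2 : n.toNat ≤ mrun (cs.drop i.toNat) := by omega
    exact ((key_mrun _ _).mp h2).2
  · intro h
    have hlen : n.toNat ≤ (cs.drop i.toNat).length := by
      simp only [List.length_drop]; omega
    have h3 := (key_mrun (cs.drop i.toNat) n.toNat).mpr ⟨hlen, h⟩
    omega

theorem inner_eq (s : String) (n : Int) (hn : 2 ≤ n)
    (st : PySem.Dict String Int × Int × String) :
    (PySem.List.pyRange 0 (PySem.Str.len s - n + 1) 1).foldl (fun st i =>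
      let check_unique := (PySem.List.pyRange 0 n 1).foldl
        (fun cu j => PySem.Set.add cu ((PySem.Str.pyGet? s (i+j)).getD ' '))
        PySem.Set.empty
      if PySem.Set.len check_unique = n then
        let d := st.1
        let key := PySem.Str.slice s (some i) (some (i+n))
        let d' := if PySem.Dict.contains d key
                  then PySem.Dict.insert d key (PySem.Dict.getD d key 0 + 1)
                  else PySem.Dict.insert d key 1
        let v := PySem.Dict.getD d' key 0
        if st.2.1 < v then (d', max st.2.1 v, key) else (d', st.2.1, st.2.2)
      else st) st
    = (PySem.List.pyRange 0 ((s.toList.length : Int) - n + 1) 1).foldl (fun st i =>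
      if PySem.List.pyGetD ((List.range (s.toList.length + 1)).map
          (fun j => ((mrun (s.toList.drop j) : Nat) : Int))) i 0 ≥ n then
        let w := PySem.Str.slice s (some i) (some (i+n))
        let c := PySem.Dict.getD st.1 w 0 + 1
        let freq := PySem.Dict.insert st.1 w c
        if c > st.2.1 then (freq, c, w) else (freq, st.2.1, st.2.2)
      else st) st := by
  have hsl : PySem.Str.len s = (s.toList.length : Int) := by
    simp [PySem.Str.len_eq]
  rw [hsl]
  apply PySem.List.foldl_congr_mem
  intro acc i hi
  rw [PySem.List.mem_pyRange_one] at hi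
  have hi0 : 0 ≤ i := hi.1
  have hin : i + n ≤ (s.toList.length : Int) := by omega
  dsimp only
  by_cases hnd : ((s.toList.drop i.toNat).take n.toNat).Nodup
  · rw [if_pos ((testA_iff s n i (by omega) hi0 hin).mpr hnd),
      if_pos ((testB_iff s.toList n i (by omega) hi0 hin).mpr hnd)]
    have hd : (if PySem.Dict.contains acc.1 (PySem.Str.slice s (some i) (some (i+n)))
              then PySem.Dict.insert acc.1 (PySem.Str.slice s (some i) (some (i+n)))
                (PySem.Dict.getD acc.1 (PySem.Str.slice s (some i) (some (i+n))) 0 + 1)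
              else PySem.Dict.insert acc.1 (PySem.Str.slice s (some i) (some (i+n))) 1)
        = PySem.Dict.insert acc.1 (PySem.Str.slice s (some i) (some (i+n)))
            (PySem.Dict.getD acc.1 (PySem.Str.slice s (some i) (some (i+n))) 0 + 1) := by
      by_cases h : PySem.Dict.contains acc.1 (PySem.Str.slice s (some i) (some (i+n)))
      · rw [if_pos h]
      · rw [if_neg h, PySem.Dict.getD_of_not_contains acc.1 0 (by simpa using h)]
        norm_num
    rw [hd, PySem.Dict.getD_insert_self]
    simp only [gt_iff_lt]
    split_ifs with h
    · rw [max_eq_right (le_of_lt h)]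
    · rfl
  · rw [if_neg (fun hc => hnd ((testA_iff s n i (by omega) hi0 hin).mp hc)),
      if_neg (fun hc => hnd ((testB_iff s.toList n i (by omega) hi0 hin).mp hc))]

theorem outer_shrink {β : Type} (f : β → Int → β) (k L : Int) (hL : 0 ≤ L) (init : β)
    (hid : ∀ n st, L < n → f st n = st) :
    (PySem.List.pyRange 2 (k+1) 1).foldl f init
    = (PySem.List.pyRange 2 (min k L + 1) 1).foldl f init := by
  by_cases h : k ≤ L
  · rw [min_eq_left h]
  · rw [min_eq_right (by omega : L ≤ k)]
    by_cases h2 : 2 ≤ L + 1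
    · rw [PySem.List.pyRange_one_append 2 (L+1) (k+1) h2 (by omega), List.foldl_append]
      apply foldl_id
      intro x hx st
      rw [PySem.List.mem_pyRange_one] at hx
      exact hid x st (by omega)
    · have hL0 : L = 0 := by omega
      rw [hL0]
      rw [PySem.List.pyRange_one_eq_nil (show (0:Int)+1 ≤ 2 by omega)]
      simp only [List.foldl_nil]
      apply foldl_id
      intro x hx st
      rw [PySem.List.mem_pyRange_one] at hx
      exact hid x st (by omega)
theorem cal_eq (k : Int) (s : String) : cal_frequency k s = cal_frequency_alt k s := by
  have hrev0 : [(0 : Int)] = ((List.range' s.toList.length (s.toList.length + 1 - s.toList.length)).map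
      (fun j => ((mrun (s.toList.drop j) : Nat) : Int))).reverse := by
    have h1 : s.toList.length + 1 - s.toList.length = 1 := by omega
    rw [h1, List.range'_one]
    simp only [List.map_cons, List.map_nil, List.reverse_singleton, List.drop_length]
    rfl
  have hB : cal_frequency_alt k s =
      (fun res => (res.1.items, res.2.1, res.2.2))
        ((PySem.List.pyRange 2 (min k (s.toList.length : Int) + 1) 1).foldl (fun st n =>
          (PySem.List.pyRange 0 ((s.toList.length : Int) - n + 1) 1).foldl (fun st i =>
            if PySem.List.pyGetD ((List.range (s.toList.length + 1)).map
                (fun j => ((mrun (s.toList.drop j) : Nat) : Int))) i 0 ≥ n then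
              let w := PySem.Str.slice s (some i) (some (i+n))
              let c := PySem.Dict.getD st.1 w 0 + 1
              let freq := PySem.Dict.insert st.1 w c
              if c > st.2.1 then (freq, c, w) else (freq, st.2.1, st.2.2)
            else st) st) ((PySem.Dict.empty : PySem.Dict String Int), (0 : Int), "")) := by
    unfold cal_frequency_alt
    dsimp only
    rw [hrev0, rev_fold s.toList s.toList.length le_rfl, PySem.List.slice?_none_none_neg_one]
    simp only [Option.getD_some, List.reverse_reverse, ← List.range_eq_range']
  rw [hB]
  unfold cal_frequency
  dsimp only
  have hfold := (PySem.List.foldl_congr_mem (PySem.List.pyRange 2 (k+1) 1) _ _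
      ((PySem.Dict.empty : PySem.Dict String Int), (0 : Int), "")
      (fun acc n hn => inner_eq s n ((PySem.List.mem_pyRange_one.mp hn).1) acc)).trans
    (outer_shrink _ k (s.toList.length : Int) (Int.natCast_nonneg _) _
      (fun n st hl => by rw [PySem.List.pyRange_one_eq_nil (by omega)]; rfl))
  exact congrArg (fun res => (res.1.items, res.2.1, res.2.2)) hfold

-- ===== VERDICT (by name: the statement is the Claim_ definition above) =====
theorem cal_frequency_spec : Claim_equal_cal_frequency := by
  intro k s _
  exact cal_eq k s
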